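-- pv_equiv track=rewrite | github.com/daniel-reich/ubiquitous-fiesta | gphnuvoHDANN2Fmca_23.py | odd_sort
-- ===== SOURCE A (Python) =====
-- def odd_sort(lst):
--   odds = []
--   for i in range(len(lst)):
--     if lst[i]%2==1:
--       odds.append(lst[i])
--       lst[i] = '_'
--   odds.sort()
--   k = 0
--   for i in range(len(lst)):
--     if lst[i] == '_':
--       lst[i] = odds[k]
--       k += 1
--   return lst
-- ===== SOURCE B (Python) =====
-- def odd_sort(lst):
--   # In-place selection sort restricted to the odd entries; evens never move.
--   # Like A, mutates lst and returns it.
--   out = []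
--   rest = lst[:]
--   while rest:
--     x = rest.pop(0)
--     if x % 2 == 1:
--       best, pos = x, -1
--       for j, v in enumerate(rest):
--         if v % 2 == 1 and v < best:
--           best, pos = v, j
--       if pos >= 0:
--         rest[pos] = x
--       out.append(best)
--     else:
--       out.append(x)
--   lst[:] = out
--   return lst
-- ===== Notes on version B (the rewrite author's own statement) =====
-- stated objective: alternative
-- what changed: B performs an in-place selection sort over the odd entries (repeatedly pulling the smallest remaining odd value forward, leaving evens fixed), instead of A's collect-the-odds / library-sort / write-back-over-'_'-sentinels strategy; no auxiliary sorted list or sentinel marking exists in B.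
import Mathlib
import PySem

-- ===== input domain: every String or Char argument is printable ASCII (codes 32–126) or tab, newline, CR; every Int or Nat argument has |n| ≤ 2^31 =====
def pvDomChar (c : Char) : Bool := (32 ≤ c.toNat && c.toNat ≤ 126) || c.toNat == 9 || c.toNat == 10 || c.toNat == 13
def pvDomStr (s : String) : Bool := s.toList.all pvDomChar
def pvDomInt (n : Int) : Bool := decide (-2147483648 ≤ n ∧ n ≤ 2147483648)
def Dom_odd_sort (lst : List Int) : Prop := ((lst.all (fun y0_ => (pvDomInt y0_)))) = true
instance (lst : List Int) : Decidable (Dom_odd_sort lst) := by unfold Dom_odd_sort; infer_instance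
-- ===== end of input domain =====

-- B replaces A's collect-odds / library-sort / write-back-over-'_'-sentinels strategy by an
-- in-place selection sort restricted to the odd entries (alternative algorithm, no sorted list).
-- Both Pythons mutate lst in place the same way; the equivalence proved is about the return value.

-- ===== PORT A =====
-- first loop: replace each odd entry by the sentinel (none = '_'), collecting the odds in order
def oddMark : List Int → List (Option Int) × List Int
  | [] => ([], [])
  | x :: xs =>
    let r := oddMark xs
    if PySem.Int.mod x 2 == 1 then (none :: r.1, x :: r.2) else (some x :: r.1, r.2)

-- second loop: replace each sentinel by the next sorted odd value
-- (the 'none, []' branch is Python's odds[k] IndexError; it is unreachable since the counts match)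
def oddFill : List (Option Int) → List Int → List Int
  | [], _ => []
  | some x :: m, o => x :: oddFill m o
  | none :: m, o =>
    match o with
    | y :: o' => y :: oddFill m o'
    | [] => []

def odd_sort (lst : List Int) : List Int :=
  let r := oddMark lst
  oddFill r.1 (PySem.List.sorted r.2 (fun x => x) false)

-- ===== PORT B =====
-- inner "for j, v in enumerate(rest)" scan: running (best, pos), pos = -1 meaning "no swap"
def selScan (x : Int) (rest : List Int) : Int × Int :=
  (PySem.List.enumerate rest 0).foldl
    (fun bp jv => if PySem.Int.mod jv.2 2 == 1 && jv.2 < bp.1 then (jv.2, jv.1) else bp)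
    (x, -1)

-- outer "while rest" loop over the state (out, rest); rest.pop(0) is the structural head
def selLoop (out : List Int) : List Int → List Int
  | [] => out
  | x :: rest =>
    if PySem.Int.mod x 2 == 1 then
      let bp := selScan x rest
      let rest' := if 0 ≤ bp.2 then rest.set bp.2.toNat x else rest
      selLoop (out ++ [bp.1]) rest'
    else selLoop (out ++ [x]) rest
termination_by l => l.length
decreasing_by
  · simp only [List.length_cons]
    split <;> simp [List.length_set]
  · simp

def odd_sort_alt (lst : List Int) : List Int := selLoop [] lst

-- ===== PRECONDITION & SPEC =====
def Spec_odd_sort (lst : List Int) (out : List Int) : Prop := out = odd_sort_alt lst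
instance (lst : List Int) (out : List Int) : Decidable (Spec_odd_sort lst out) := by unfold Spec_odd_sort; infer_instance

-- ===== CLAIM (what is proved, stated in full; the proofs are below) =====
def Claim_equal_odd_sort : Prop := ∀ (lst : List Int), Dom_odd_sort lst → Spec_odd_sort lst (odd_sort lst)

-- ===== LEMMAS AND PROOFS =====

theorem selFold_inv (ps : List (Int × Int)) (b₀ p₀ : Int) :
    (ps.foldl (fun bp jv => if PySem.Int.mod jv.2 2 == 1 && jv.2 < bp.1 then (jv.2, jv.1) else bp) (b₀, p₀)).1 ≤ b₀ ∧
    (∀ q ∈ ps, PySem.Int.mod q.2 2 == 1 →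
      (ps.foldl (fun bp jv => if PySem.Int.mod jv.2 2 == 1 && jv.2 < bp.1 then (jv.2, jv.1) else bp) (b₀, p₀)).1 ≤ q.2) ∧
    ((ps.foldl (fun bp jv => if PySem.Int.mod jv.2 2 == 1 && jv.2 < bp.1 then (jv.2, jv.1) else bp) (b₀, p₀)) = (b₀, p₀) ∨
      ∃ q ∈ ps, (ps.foldl (fun bp jv => if PySem.Int.mod jv.2 2 == 1 && jv.2 < bp.1 then (jv.2, jv.1) else bp) (b₀, p₀)) = (q.2, q.1) ∧
        PySem.Int.mod q.2 2 = 1) := by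
  induction ps generalizing b₀ p₀ with
  | nil => simp
  | cons q t ih =>
    simp only [List.foldl_cons]
    by_cases hc : (PySem.Int.mod q.2 2 == 1 && q.2 < b₀) = true
    · rw [if_pos hc]
      obtain ⟨h1, h2, h3⟩ := ih q.2 q.1
      simp only [Bool.and_eq_true, decide_eq_true_eq] at hc
      refine ⟨le_trans h1 (le_of_lt hc.2), ?_, ?_⟩
      · intro r hr hodd
        rcases List.mem_cons.mp hr with hr | hr
        · subst hr; exact h1
        · exact h2 r hr hodd
      · rcases h3 with h3 | ⟨r, hr, h3⟩
        · exact Or.inr ⟨q, by simp, h3, by simpa using hc.1⟩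
        · exact Or.inr ⟨r, by simp [hr], h3⟩
    · rw [if_neg hc]
      obtain ⟨h1, h2, h3⟩ := ih b₀ p₀
      refine ⟨h1, ?_, ?_⟩
      · intro r hr hodd
        rcases List.mem_cons.mp hr with hr | hr
        · subst hr
          simp only [Bool.and_eq_true, decide_eq_true_eq, not_and] at hc
          have := hc hodd
          omega
        · exact h2 r hr hodd
      · rcases h3 with h3 | ⟨r, hr, h3⟩
        · exact Or.inl h3
        · exact Or.inr ⟨r, by simp [hr], h3⟩
theorem mem_enumerate_pos (xs : List Int) (s : Int) (q : Int × Int) (h : q ∈ PySem.List.enumerate xs s) :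
    s ≤ q.1 ∧ (q.1 - s).toNat < xs.length ∧ xs[(q.1 - s).toNat]? = some q.2 := by
  induction xs generalizing s with
  | nil => simp [PySem.List.enumerate_nil] at h
  | cons x t ih =>
    rw [PySem.List.enumerate_cons] at h
    rcases List.mem_cons.mp h with h | h
    · subst h; simp
    · obtain ⟨h1, h2, h3⟩ := ih (s + 1) h
      refine ⟨by omega, by simp; omega, ?_⟩
      have : (q.1 - s).toNat = (q.1 - (s+1)).toNat + 1 := by omega
      rw [this]
      simpa using h3

theorem oddMark_fst (xs : List Int) :
    (oddMark xs).1 = xs.map (fun v => if PySem.Int.mod v 2 == 1 then none else some v) := by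
  induction xs with
  | nil => rfl
  | cons x t ih => simp only [oddMark, List.map_cons]; split_ifs with h <;> simp [ih]

theorem oddMark_snd (xs : List Int) :
    (oddMark xs).2 = xs.filter (fun x => PySem.Int.mod x 2 == 1) := by
  induction xs with
  | nil => rfl
  | cons x t ih =>
    simp only [oddMark, List.filter_cons]
    split_ifs with h <;> simp only [ih]

theorem cons_middle_perm (a b : Int) (t d : List Int) : (a :: (t ++ b :: d)).Perm (b :: (t ++ a :: d)) := by
  rw [List.perm_iff_count]; intro c
  simp [List.count_append, List.count_cons]; ring

theorem selStep_spec (x : Int) (rest : List Int) (hx : PySem.Int.mod x 2 == 1) :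
    ((selScan x rest).1 :: (oddMark (if 0 ≤ (selScan x rest).2 then rest.set (selScan x rest).2.toNat x else rest)).2).Perm
      (x :: (oddMark rest).2) ∧
    (oddMark (if 0 ≤ (selScan x rest).2 then rest.set (selScan x rest).2.toNat x else rest)).1 = (oddMark rest).1 ∧
    (∀ v ∈ x :: (oddMark rest).2, (selScan x rest).1 ≤ v) := by
  obtain ⟨H1, H2, H3⟩ := selFold_inv (PySem.List.enumerate rest 0) x (-1)
  rw [show (PySem.List.enumerate rest 0).foldl
        (fun bp jv => if PySem.Int.mod jv.2 2 == 1 && jv.2 < bp.1 then (jv.2, jv.1) else bp) (x, -1)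
      = selScan x rest from rfl] at H1 H2 H3
  have Hmin : ∀ v ∈ x :: (oddMark rest).2, (selScan x rest).1 ≤ v := by
    intro v hv
    rcases List.mem_cons.mp hv with hv | hv
    · subst hv; exact H1
    · rw [oddMark_snd] at hv
      obtain ⟨hvmem, hvodd⟩ := List.mem_filter.mp hv
      obtain ⟨q, hq, hq2⟩ := List.mem_map.mp ((PySem.List.map_snd_enumerate rest 0) ▸ hvmem)
      exact hq2 ▸ H2 q hq (by rw [hq2]; exact hvodd)
  by_cases h0 : 0 ≤ (selScan x rest).2
  · rcases H3 with H3 | ⟨q, hq, hqe, hqodd⟩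
    · rw [H3] at h0; omega
    · have h1 : (selScan x rest).1 = q.2 := by rw [hqe]
      have h2 : (selScan x rest).2 = q.1 := by rw [hqe]
      obtain ⟨hpos, hlt, hget⟩ := mem_enumerate_pos rest 0 q hq
      simp only [Int.sub_zero] at hlt hget
      have hgetE : rest[q.1.toNat] = q.2 := by
        have := List.getElem?_eq_getElem hlt
        rw [hget] at this; exact (Option.some.injEq _ _).mp this.symm
      rw [if_pos h0, h2]
      have hset : rest.set q.1.toNat x = rest.take q.1.toNat ++ x :: rest.drop (q.1.toNat + 1) :=
        List.set_eq_take_cons_drop x hlt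
      have hrest : rest = rest.take q.1.toNat ++ q.2 :: rest.drop (q.1.toNat + 1) := by
        conv_lhs => rw [← List.take_append_drop q.1.toNat rest]
        rw [List.drop_eq_getElem_cons hlt, hgetE]
      refine ⟨?_, ?_, Hmin⟩
      · rw [h1, oddMark_snd, oddMark_snd, hset]
        conv_rhs => rw [hrest]
        rw [List.filter_append, List.filter_append, List.filter_cons, List.filter_cons,
          if_pos hx, if_pos (by simpa using hqodd)]
        exact cons_middle_perm q.2 x _ _
      · rw [oddMark_fst, oddMark_fst, hset]
        conv_rhs => rw [hrest]
        rw [List.map_append, List.map_append, List.map_cons, List.map_cons,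
          if_pos hx, if_pos (by simpa using hqodd)]
  · rw [if_neg h0]
    have hb : (selScan x rest).1 = x := by
      rcases H3 with H3 | ⟨q, hq, hqe, hqodd⟩
      · rw [H3]
      · obtain ⟨hpos, _, _⟩ := mem_enumerate_pos rest 0 q hq
        rw [hqe] at h0; simp at h0; omega
    exact ⟨by rw [hb], rfl, Hmin⟩

theorem selLoop_eq (n : Nat) : ∀ (xs : List Int), xs.length = n → ∀ (out : List Int),
    selLoop out xs = out ++ oddFill (oddMark xs).1 (PySem.List.sorted (oddMark xs).2 (fun x => x) false) := by
  induction n with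
  | zero =>
    intro xs hlen out
    rw [List.length_eq_zero_iff.mp hlen]
    simp [selLoop, oddMark, oddFill, PySem.List.sorted]
  | succ n ih =>
    intro xs hlen out
    obtain ⟨x, rest, rfl⟩ : ∃ y t, xs = y :: t := by
      cases xs with
      | nil => simp at hlen
      | cons y t => exact ⟨y, t, rfl⟩
    have hlr : rest.length = n := by simpa using hlen
    by_cases hx : (PySem.Int.mod x 2 == 1) = true
    · obtain ⟨P, M, C⟩ := selStep_spec x rest hx
      set b := (selScan x rest).1 with hb
      set rest' := (if 0 ≤ (selScan x rest).2 then rest.set (selScan x rest).2.toNat x else rest) with hr'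
      have hlen' : rest'.length = n := by
        rw [hr']; split <;> simp [List.length_set, hlr]
      have hstep : selLoop out (x :: rest) = selLoop (out ++ [b]) rest' := by
        rw [selLoop, if_pos hx]
      have hmark : oddMark (x :: rest) = (none :: (oddMark rest).1, x :: (oddMark rest).2) := by
        simp only [oddMark]; rw [if_pos hx]
      have hsorted : PySem.List.sorted (x :: (oddMark rest).2) (fun y => y) false
          = b :: PySem.List.sorted (oddMark rest').2 (fun y => y) false := by
        apply PySem.List.sorted_id_eq_of_perm_of_pairwise
        · refine List.Perm.trans ?_ P
          exact List.Perm.cons b (PySem.List.sorted_perm _ _ _)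
        · rw [List.pairwise_cons]
          refine ⟨?_, ?_⟩
          · intro v hv
            have hv' : v ∈ (oddMark rest').2 := (PySem.List.mem_sorted _ _ _ _).mp hv
            have : v ∈ x :: (oddMark rest).2 := P.mem_iff.mp (List.mem_cons_of_mem b hv')
            exact C v this
          · exact PySem.List.sorted_pairwise _ _
      rw [hstep, ih rest' hlen' (out ++ [b]), hmark]
      simp only
      rw [hsorted, ← M]
      show (out ++ [b]) ++ _ = out ++ (b :: oddFill (oddMark rest').1 _)
      simp
    · have hstep : selLoop out (x :: rest) = selLoop (out ++ [x]) rest := by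
        rw [selLoop, if_neg hx]
      have hmark : oddMark (x :: rest) = (some x :: (oddMark rest).1, (oddMark rest).2) := by
        simp only [oddMark]; rw [if_neg hx]
      rw [hstep, ih rest hlr (out ++ [x]), hmark]
      show (out ++ [x]) ++ _ = out ++ (x :: oddFill (oddMark rest).1 _)
      simp

-- ===== VERDICT (by name: the statement is the Claim_ definition above) =====
theorem odd_sort_spec : Claim_equal_odd_sort := by
  intro lst _
  show odd_sort lst = odd_sort_alt lst
  rw [odd_sort, odd_sort_alt, selLoop_eq lst.length lst rfl []]
  rfl
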